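-- pv_equiv track=rewrite | github.com/pablokaua03/Contexta | context_engine.py | prioritize_dependencies
-- ===== SOURCE A (Python) =====
-- def prioritize_dependencies(dependency_names: set[str]) -> list[str]:
--     priority_order = [
--         "next",
--         "react",
--         "vue",
--         "svelte",
--         "@sveltejs/kit",
--         "typescript",
--         "tailwindcss",
--         "@tailwindcss/postcss",
--         "firebase",
--         "fastapi",
--         "django",
--         "flask",
--         "express",
--         "laravel/framework",
--         "illuminate/database",
--     ]
--     selected: list[str] = []
--     lowered = {dep.lower() for dep in dependency_names}
--     for dep in priority_order:
--         if dep in lowered and dep not in selected: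
--             selected.append(dep)
--     for dep in sorted(lowered):
--         if dep not in selected:
--             selected.append(dep)
--     return selected[:8]
-- ===== SOURCE B (Python) =====
-- def prioritize_dependencies(dependency_names: set[str]) -> list[str]:
--     priority_order = [
--         "next",
--         "react",
--         "vue",
--         "svelte",
--         "@sveltejs/kit",
--         "typescript",
--         "tailwindcss",
--         "@tailwindcss/postcss",
--         "firebase",
--         "fastapi",
--         "django",
--         "flask",
--         "express",
--         "laravel/framework",
--         "illuminate/database",
--     ]
--     rank = {dep: i for i, dep in enumerate(priority_order)}
--     sentinel = len(priority_order)
--     lowered = {dep.lower() for dep in dependency_names}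
--     return sorted(lowered, key=lambda d: (rank.get(d, sentinel), d))[:8]
-- ===== Notes on version B (the rewrite author's own statement) =====
-- stated objective: simpler
-- what changed: Replaces A's two explicit accumulation loops (walk the priority list appending hits, then append the sorted remainder, each guarded by a linear 'not in selected' scan) with a single keyed sort of the lowered set using a precomputed rank index table and the sentinel len(priority_order), sliced to 8.
import Mathlib
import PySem

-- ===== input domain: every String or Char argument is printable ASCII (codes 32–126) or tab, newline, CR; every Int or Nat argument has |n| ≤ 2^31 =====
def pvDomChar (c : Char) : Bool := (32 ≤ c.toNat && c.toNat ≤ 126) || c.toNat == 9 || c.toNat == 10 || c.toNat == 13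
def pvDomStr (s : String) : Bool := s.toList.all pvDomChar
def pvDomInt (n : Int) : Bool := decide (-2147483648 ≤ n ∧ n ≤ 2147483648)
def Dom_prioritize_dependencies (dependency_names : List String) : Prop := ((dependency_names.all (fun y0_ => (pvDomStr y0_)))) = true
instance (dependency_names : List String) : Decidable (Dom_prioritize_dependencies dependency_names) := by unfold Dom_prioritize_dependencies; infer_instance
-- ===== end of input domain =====

-- B replaces A's two accumulation loops (priority walk, then sorted-remainder append) with one
-- keyed sort over a rank index table, sliced to 8 — objective: simpler (same result set is used;
-- iteration order of the input set never influences the result in either version).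

-- The shared literal priority list (appears verbatim in both Pythons).
def pvPriorityOrder : List String :=
  ["next", "react", "vue", "svelte", "@sveltejs/kit", "typescript", "tailwindcss",
   "@tailwindcss/postcss", "firebase", "fastapi", "django", "flask", "express",
   "laravel/framework", "illuminate/database"]

-- ===== PORT A =====
def prioritize_dependencies (dependency_names : List String) : List String :=
  let priority_order := pvPriorityOrder
  let lowered : PySem.Set String := PySem.Set.ofList (dependency_names.map PySem.Str.lower)
  let selected : List String :=
    priority_order.foldl (fun sel dep =>
      if PySem.Set.contains lowered dep && !(sel.contains dep) then sel ++ [dep] else sel) []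
  let selected :=
    (PySem.List.sorted lowered (fun x => x)).foldl (fun sel dep =>
      if !(sel.contains dep) then sel ++ [dep] else sel) selected
  PySem.List.slice selected none (some 8)

-- ===== PORT B =====
def prioritize_dependencies_alt (dependency_names : List String) : List String :=
  let priority_order := pvPriorityOrder
  let rank : PySem.Dict String Int :=
    (PySem.List.enumerate priority_order).foldl (fun d p => d.insert p.2 p.1) PySem.Dict.empty
  let sentinel : Int := priority_order.length
  let lowered : PySem.Set String := PySem.Set.ofList (dependency_names.map PySem.Str.lower)
  PySem.List.slice
    (PySem.List.sorted2 lowered (fun d => rank.getD d sentinel) (fun d => d)) none (some 8)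

-- ===== PRECONDITION & SPEC =====
def Spec_prioritize_dependencies (dependency_names : List String) (out : List String) : Prop := out = prioritize_dependencies_alt dependency_names
instance (dependency_names : List String) (out : List String) : Decidable (Spec_prioritize_dependencies dependency_names out) := by unfold Spec_prioritize_dependencies; infer_instance

-- ===== CLAIM (what is proved, stated in full; the proofs are below) =====
def Claim_equal_prioritize_dependencies : Prop := ∀ (dependency_names : List String), Dom_prioritize_dependencies dependency_names → Spec_prioritize_dependencies dependency_names (prioritize_dependencies dependency_names)

-- ===== LEMMAS AND PROOFS =====

-- The rank dictionary of port B, lifted out for the proofs.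
def pvRank : PySem.Dict String Int :=
  (PySem.List.enumerate pvPriorityOrder).foldl (fun d p => d.insert p.2 p.1) PySem.Dict.empty

theorem pv_rank_keys : pvRank.keys = pvPriorityOrder := by decide
theorem pv_rank_lt : ∀ a ∈ pvPriorityOrder, pvRank.getD a 15 < 15 := by decide
theorem pv_rank_default (b : String) (hb : b ∉ pvPriorityOrder) : pvRank.getD b 15 = 15 := by
  refine PySem.Dict.getD_of_not_contains pvRank 15 ?_
  refine Bool.eq_false_iff.mpr (fun h => hb ?_)
  rw [← pv_rank_keys]
  exact (PySem.Dict.contains_iff_mem_keys pvRank b).mp h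
theorem pv_rank_pairwise :
    pvPriorityOrder.Pairwise (fun a b => pvRank.getD a 15 < pvRank.getD b 15) := by decide

-- A's second loop appends the not-yet-selected elements of a duplicate-free list, in order.
theorem pv_loop2 :
    ∀ (M acc : List String), M.Nodup →
      M.foldl (fun sel dep => if !(sel.contains dep) then sel ++ [dep] else sel) acc
      = acc ++ M.filter (fun d => !(acc.contains d)) := by
  intro M
  induction M with
  | nil => simp
  | cons d tl ih =>
    intro acc hnd
    rcases List.nodup_cons.mp hnd with ⟨hd, htl⟩
    by_cases hc : d ∈ acc
    · rw [List.foldl_cons, if_neg (by simp [hc]), ih acc htl, List.filter_cons]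
      simp [hc]
    · rw [List.foldl_cons, if_pos (by simp [hc]), ih (acc ++ [d]) htl, List.filter_cons]
      rw [List.filter_congr (l := tl) (q := fun x => !(acc.contains x)) (fun x hx => by
        have hxd : x ≠ d := fun h => hd (h ▸ hx)
        simp [hxd])]
      simp [hc]
-- A's first loop is a filter of the (duplicate-free) priority list.
theorem pv_loop1 (L : List String) :
    ∀ (P acc : List String), P.Nodup → (∀ d ∈ P, d ∉ acc) →
      P.foldl (fun sel dep =>
        if PySem.Set.contains L dep && !(sel.contains dep) then sel ++ [dep] else sel) acc
      = acc ++ P.filter (fun d => PySem.Set.contains L d) := by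
  intro P
  induction P with
  | nil => simp
  | cons d tl ih =>
    intro acc hnd hacc
    rcases List.nodup_cons.mp hnd with ⟨hd, htl⟩
    have hdacc : d ∉ acc := hacc d (by simp)
    by_cases hc : d ∈ L
    · rw [List.foldl_cons, if_pos (by simp [hc, hdacc]),
        ih (acc ++ [d]) htl (fun x hx => by
          have hxd : x ≠ d := fun h => hd (h ▸ hx)
          simp [hxd, hacc x (List.mem_cons_of_mem _ hx)]),
        List.filter_cons]
      simp [hc]
    · rw [List.foldl_cons, if_neg (by simp [hc]),
        ih acc htl (fun x hx => hacc x (List.mem_cons_of_mem _ hx)), List.filter_cons]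
      simp [hc]

-- Python's tuple-keyed sort is the sort by the lexicographic product key.
theorem pv_sorted2_eq_sorted {α : Type} (xs : List α) {κ₁ κ₂ : Type}
    [LinearOrder κ₁] [LinearOrder κ₂] (k1 : α → κ₁) (k2 : α → κ₂) :
    PySem.List.sorted2 xs k1 k2 = PySem.List.sorted xs (fun a => toLex (k1 a, k2 a)) := by
  rw [PySem.List.sorted_eq_foldl_insertBy]
  unfold PySem.List.sorted2
  simp only [if_neg (by decide : ¬ (false = true))]
  have hb : (fun a b => decide (k1 a < k1 b) || (!decide (k1 b < k1 a) && decide (k2 a < k2 b)))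
      = (fun a b => decide ((fun a => toLex (k1 a, k2 a)) a < (fun a => toLex (k1 a, k2 a)) b)) := by
    funext a b
    rcases lt_trichotomy (k1 a) (k1 b) with h | h | h
    · simp [Prod.Lex.lt_iff, h]
    · simp [Prod.Lex.lt_iff, h]
    · simp [Prod.Lex.lt_iff, h, lt_asymm h, h.ne']
  rw [hb]

-- A's full selected list (before the [:8] slice) IS B's keyed sort of the lowered set.
theorem pv_core (xs : List String) :
    (PySem.List.sorted (PySem.Set.ofList xs) (fun x => x)).foldl
        (fun sel dep => if !(sel.contains dep) then sel ++ [dep] else sel)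
        (pvPriorityOrder.foldl (fun sel dep =>
          if PySem.Set.contains (PySem.Set.ofList xs) dep && !(sel.contains dep)
          then sel ++ [dep] else sel) [])
      = PySem.List.sorted2 (PySem.Set.ofList xs) (fun d => pvRank.getD d 15) (fun d => d) := by
  have hLnd : (PySem.Set.ofList xs).Nodup := PySem.Set.nodup_ofList xs
  have hsortnd : (PySem.List.sorted (PySem.Set.ofList xs) (fun x => x)).Nodup :=
    ((PySem.List.sorted_perm (PySem.Set.ofList xs) (fun x => x) false).nodup_iff).mpr hLnd
  rw [pv_loop1 (PySem.Set.ofList xs) pvPriorityOrder [] (by decide) (by simp),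
      pv_loop2 _ _ hsortnd, pv_sorted2_eq_sorted, List.nil_append]
  set L := PySem.Set.ofList xs with hLdef
  set sel1 := pvPriorityOrder.filter (fun d => PySem.Set.contains L d) with hsel1
  set rest := (PySem.List.sorted L (fun x => x)).filter (fun d => !(sel1.contains d)) with hrest
  -- membership characterisations
  have hPnd : pvPriorityOrder.Nodup := by decide
  have hmem_sel1 : ∀ x, x ∈ sel1 ↔ x ∈ pvPriorityOrder ∧ x ∈ L := by
    intro x; rw [hsel1]; simp [List.mem_filter]
  have hmem_rest : ∀ x, x ∈ rest ↔ x ∈ L ∧ x ∉ sel1 := by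
    intro x; rw [hrest]; simp [List.mem_filter, PySem.List.mem_sorted]
  have hrank_rest : ∀ x ∈ rest, pvRank.getD x 15 = 15 := by
    intro x hx
    rcases (hmem_rest x).mp hx with ⟨hxL, hxns⟩
    refine pv_rank_default x (fun hxP => hxns ((hmem_sel1 x).mpr ⟨hxP, hxL⟩))
  symm
  apply PySem.List.sorted_eq_of_perm_of_pairwise_lt
  · -- permutation
    have h1 : sel1.Perm (L.filter (fun x => sel1.contains x)) := by
      apply List.perm_of_nodup_nodup_toFinset_eq (hPnd.filter _) (hLnd.filter _)
      ext x
      simp only [List.mem_toFinset, List.mem_filter]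
      constructor
      · rintro ⟨hP, hL⟩
        exact ⟨by simpa using hL, by simpa using (hmem_sel1 x).mpr ⟨hP, by simpa using hL⟩⟩
      · rintro ⟨-, hx⟩
        rcases (hmem_sel1 x).mp (by simpa using hx) with ⟨h1, h2⟩
        exact ⟨h1, by simpa using h2⟩
    have h2 : rest.Perm (L.filter (fun x => !(sel1.contains x))) := by
      rw [hrest]
      exact (PySem.List.sorted_perm L (fun x => x) false).filter _
    exact (h1.append h2).trans (List.filter_append_perm (fun x => sel1.contains x) L)
  · -- pairwise strictly increasing keys
    rw [List.pairwise_append]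
    refine ⟨?_, ?_, ?_⟩
    · have := (pv_rank_pairwise.filter (fun d => PySem.Set.contains L d))
      refine this.imp_of_mem ?_
      intro a b _ _ hab
      exact Prod.Lex.lt_iff.mpr (Or.inl hab)
    · have hps : (PySem.List.sorted L (fun x => x)).Pairwise (fun a b => a < b) := by
        rw [hLdef]; exact PySem.List.sorted_ofList_pairwise_lt xs
      have := hps.filter (fun d => !(sel1.contains d))
      rw [← hrest] at this
      refine List.Pairwise.imp_of_mem ?_ this
      intro a b ha hb hab
      exact Prod.Lex.lt_iff.mpr (Or.inr ⟨(hrank_rest a ha).trans (hrank_rest b hb).symm, hab⟩)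
    · intro a ha b hb
      have h1 : pvRank.getD a 15 < 15 := pv_rank_lt a ((hmem_sel1 a).mp ha).1
      exact Prod.Lex.lt_iff.mpr (Or.inl (by rw [hrank_rest b hb]; exact h1))

-- ===== VERDICT (by name: the statement is the Claim_ definition above) =====
theorem prioritize_dependencies_spec : Claim_equal_prioritize_dependencies := by
  intro dn _
  show prioritize_dependencies dn = prioritize_dependencies_alt dn
  exact congrArg (fun l => PySem.List.slice l none (some 8)) (pv_core (dn.map PySem.Str.lower))
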